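-- pv_equiv track=rewrite | github.com/jdj2261/Algorithm-study | DongBinNa/Implementation/programmers_01.py | solution
-- ===== SOURCE A (Python) =====
-- def solution(answers):
--
--     answer = []
--
--     first_student = [1,2,3,4,5]
--     second_student = [2,1,2,3,2,4,2,5]
--     third_student = [3,3,1,1,2,2,4,4,5,5]
--
--     len_answers = len(answers)
--
--     len_first_student = len(first_student)
--
--     share = len_answers // len_first_student
--     remainder = len_answers % len_first_student
--
--     if len_answers > len_first_student:
--         result_first = first_student * share
--         result_second = second_student * share
--         result_third = third_student * share
--         if remainder != 0:
--             for i in range(remainder):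
--                 result_first.append(first_student[i])
--                 result_second.append(second_student[i])
--                 result_third.append(third_student[i])
--     else:
--         result_first = []
--         result_second = []
--         result_third = []
--         for i in range(len_answers):
--             result_first.append(first_student[i])
--             result_second.append(second_student[i])
--             result_third.append(third_student[i])
--
--     first_result = []
--     second_result = []
--     third_result = []
--     for i in range(len_answers):
--         if result_first[i] == answers[i]:
--             first_result.append(result_first[i])
--         if result_second[i] == answers[i]:
--             second_result.append(result_second[i])
--         if result_third[i] == answers[i]:
--             third_result.append(result_third[i])
--
--     result = []
--     result.append(len(first_result))
--     result.append(len(second_result))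
--     result.append(len(third_result))
--
--     for person, score in enumerate(result):
--         if score == max(result):
--             answer.append(person+1)
--
--     return answer
-- ===== SOURCE B (Python) =====
-- def solution(answers):
--     patterns = [[1, 2, 3, 4, 5],
--                 [2, 1, 2, 3, 2, 4, 2, 5],
--                 [3, 3, 1, 1, 2, 2, 4, 4, 5, 5]]
--     scores = [sum(1 for i, a in enumerate(answers) if p[i % len(p)] == a)
--               for p in patterns]
--     m = max(scores)
--     return [i + 1 for i, s in enumerate(scores) if s == m]
-- ===== Notes on version B (the rewrite author's own statement) =====
-- stated objective: simpler
-- what changed: B drops A's materialization of three replicated answer-sheet lists (with branch/share/remainder bookkeeping) and instead scores each pattern directly by modulo indexing in one enumerate pass, then selects the argmax positions.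
import Mathlib
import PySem

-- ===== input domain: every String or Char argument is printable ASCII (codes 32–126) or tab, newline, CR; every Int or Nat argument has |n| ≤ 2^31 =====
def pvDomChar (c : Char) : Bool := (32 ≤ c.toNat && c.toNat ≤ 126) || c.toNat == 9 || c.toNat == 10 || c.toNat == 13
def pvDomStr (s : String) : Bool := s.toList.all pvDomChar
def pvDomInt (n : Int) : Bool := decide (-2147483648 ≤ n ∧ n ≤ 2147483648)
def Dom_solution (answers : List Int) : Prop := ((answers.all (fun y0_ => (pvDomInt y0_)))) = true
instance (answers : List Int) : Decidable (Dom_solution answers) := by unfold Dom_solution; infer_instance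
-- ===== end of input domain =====

-- B replaces A's materialization of three replicated answer sheets (with share/remainder
-- branch bookkeeping) by direct modulo-indexed scoring of each pattern in one pass; objective: simpler.

-- ===== PORT A =====
-- Notes on exactness: all Python indexing below is with i ∈ range(…) provably in range,
-- so `List.getD _ i 0` is exact; `len // 5` and `len % 5` on a nonnegative length agree
-- with Nat `/` and `%`; Python `list * share` is `(List.replicate share l).flatten`.
def solution (answers : List Int) : List Int :=
  let first_student : List Int := [1, 2, 3, 4, 5]
  let second_student : List Int := [2, 1, 2, 3, 2, 4, 2, 5]
  let third_student : List Int := [3, 3, 1, 1, 2, 2, 4, 4, 5, 5]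
  let len_answers := answers.length
  let len_first_student := first_student.length
  let share := len_answers / len_first_student
  let remainder := len_answers % len_first_student
  let res : List Int × List Int × List Int :=
    if len_answers > len_first_student then
      let result_first := (List.replicate share first_student).flatten
      let result_second := (List.replicate share second_student).flatten
      let result_third := (List.replicate share third_student).flatten
      if remainder ≠ 0 then
        (List.range remainder).foldl
          (fun (acc : List Int × List Int × List Int) i =>
            (acc.1 ++ [first_student.getD i 0],
             acc.2.1 ++ [second_student.getD i 0],
             acc.2.2 ++ [third_student.getD i 0]))
          (result_first, result_second, result_third)
      else (result_first, result_second, result_third)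
    else
      (List.range len_answers).foldl
        (fun (acc : List Int × List Int × List Int) i =>
          (acc.1 ++ [first_student.getD i 0],
           acc.2.1 ++ [second_student.getD i 0],
           acc.2.2 ++ [third_student.getD i 0]))
        ([], [], [])
  let cmp : List Int × List Int × List Int :=
    (List.range len_answers).foldl
      (fun (acc : List Int × List Int × List Int) i =>
        ((if res.1.getD i 0 == answers.getD i 0 then acc.1 ++ [res.1.getD i 0] else acc.1),
         (if res.2.1.getD i 0 == answers.getD i 0 then acc.2.1 ++ [res.2.1.getD i 0] else acc.2.1),
         (if res.2.2.getD i 0 == answers.getD i 0 then acc.2.2 ++ [res.2.2.getD i 0] else acc.2.2)))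
      ([], [], [])
  let result : List Int := [(cmp.1.length : Int), (cmp.2.1.length : Int), (cmp.2.2.length : Int)]
  (PySem.List.enumerate result).foldl
    (fun ans pr =>
      if (PySem.List.max? result (fun x => x)) = some pr.2 then ans ++ [pr.1 + 1] else ans)
    []

-- ===== PORT B =====
-- Notes on exactness: `i % len(p)` on the nonnegative enumerate index i is `i.toNat % p.length`,
-- and indexes in range, so `List.getD` is exact; `sum(1 for … if …)` is the foldl adding 1.
def solution_alt (answers : List Int) : List Int :=
  let patterns : List (List Int) :=
    [[1, 2, 3, 4, 5], [2, 1, 2, 3, 2, 4, 2, 5], [3, 3, 1, 1, 2, 2, 4, 4, 5, 5]]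
  let scores : List Int := patterns.map (fun p =>
    (PySem.List.enumerate answers).foldl
      (fun c pr => if p.getD (pr.1.toNat % p.length) 0 == pr.2 then c + 1 else c) 0)
  let m : Int := (PySem.List.max? scores (fun x => x)).getD 0
  (PySem.List.enumerate scores).foldl
    (fun ans pr => if pr.2 == m then ans ++ [pr.1 + 1] else ans) []

-- ===== PRECONDITION & SPEC =====
def Spec_solution (answers : List Int) (out : List Int) : Prop := out = solution_alt answers
instance (answers : List Int) (out : List Int) : Decidable (Spec_solution answers out) := by unfold Spec_solution; infer_instance

-- ===== CLAIM (what is proved, stated in full; the proofs are below) =====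
def Claim_equal_solution : Prop := ∀ (answers : List Int), Dom_solution answers → Spec_solution answers (solution answers)

-- ===== LEMMAS AND PROOFS =====

-- The triple-state append loop of A is the triple of componentwise append loops.
theorem foldl_triple_split {β : Type} (l : List β)
    (f g h : β → Int) (a b c : List Int) :
    l.foldl (fun (acc : List Int × List Int × List Int) i =>
        (acc.1 ++ [f i], acc.2.1 ++ [g i], acc.2.2 ++ [h i])) (a, b, c)
      = (l.foldl (fun acc i => acc ++ [f i]) a,
         l.foldl (fun acc i => acc ++ [g i]) b,
         l.foldl (fun acc i => acc ++ [h i]) c) := by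
  induction l generalizing a b c with
  | nil => rfl
  | cons x xs ih => simp [List.foldl_cons, ih]

-- The triple-state conditional-append loop of A is the triple of componentwise loops.
theorem foldl_triple_split_if {β : Type} (l : List β)
    (p q r : β → Bool) (f g h : β → Int) (a b c : List Int) :
    l.foldl (fun (acc : List Int × List Int × List Int) i =>
        ((if p i then acc.1 ++ [f i] else acc.1),
         (if q i then acc.2.1 ++ [g i] else acc.2.1),
         (if r i then acc.2.2 ++ [h i] else acc.2.2))) (a, b, c)
      = (l.foldl (fun acc i => if p i then acc ++ [f i] else acc) a,
         l.foldl (fun acc i => if q i then acc ++ [g i] else acc) b,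
         l.foldl (fun acc i => if r i then acc ++ [h i] else acc) c) := by
  induction l generalizing a b c with
  | nil => rfl
  | cons x xs ih => simp only [List.foldl_cons, ih]

theorem getD_flatten_replicate (l : List Int) (k i : Nat) (h : i < k * l.length) :
    ((List.replicate k l).flatten).getD i 0 = l.getD (i % l.length) 0 := by
  induction k generalizing i with
  | zero => omega
  | succ k ih =>
    rw [List.replicate_succ, List.flatten_cons]
    by_cases hi : i < l.length
    · rw [List.getD_append _ _ _ _ hi, Nat.mod_eq_of_lt hi]
    · push_neg at hi
      rw [Nat.succ_mul] at h
      rw [List.getD_append_right _ _ _ _ hi, ih _ (by omega),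
        Nat.mod_eq_sub_mod hi]

-- Characterization of A's replicated-and-padded lists: element i is pattern[i % len].
theorem res_char (p : List Int) (hp : 5 ≤ p.length) (n : Nat) (_hn : 5 < n) (i : Nat)
    (hi : i < n) :
    ((List.replicate (n / 5) p).flatten ++ (List.range (n % 5)).map (fun j => p.getD j 0)).getD i 0
      = p.getD (i % p.length) 0 := by
  have hlen : ((List.replicate (n / 5) p).flatten).length = n / 5 * p.length := by
    simp [List.length_flatten, Nat.mul_comm]
  by_cases hcase : i < n / 5 * p.length
  · rw [List.getD_append _ _ _ _ (by omega), getD_flatten_replicate _ _ _ hcase]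
  · push_neg at hcase
    have h5 : 5 * (n / 5) + n % 5 = n := Nat.div_add_mod n 5
    have hmul : 5 * (n / 5) ≤ n / 5 * p.length := by
      calc 5 * (n / 5) = n / 5 * 5 := Nat.mul_comm _ _
        _ ≤ n / 5 * p.length := Nat.mul_le_mul_left _ hp
    have hj : i - n / 5 * p.length < n % 5 := by omega
    rw [List.getD_append_right _ _ _ _ (by omega)]
    rw [hlen]
    have hmap : ((List.range (n % 5)).map (fun j => p.getD j 0)).getD (i - n / 5 * p.length) 0
        = p.getD (i - n / 5 * p.length) 0 := by
      rw [List.getD_eq_getElem _ _ (by simpa using hj)]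
      simp
    rw [hmap]
    have hcomm : n / 5 * p.length = p.length * (n / 5) := Nat.mul_comm _ _
    have h1 : i = p.length * (n / 5) + (i - n / 5 * p.length) := by omega
    have him : i % p.length = i - n / 5 * p.length := by
      conv_lhs => rw [h1]
      rw [Nat.mul_add_mod]
      exact Nat.mod_eq_of_lt (by omega)
    rw [him]

-- B's per-pattern scoring fold (proof-side name; solution_alt's map body).
def pvCntB (answers p : List Int) : Int :=
  (PySem.List.enumerate answers).foldl
    (fun c pr => if p.getD (pr.1.toNat % p.length) 0 == pr.2 then c + 1 else c) 0

-- A's final selection loop and B's final selection loop (proof-side names).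
def pvSelA (result : List Int) : List Int :=
  (PySem.List.enumerate result).foldl
    (fun ans pr =>
      if (PySem.List.max? result (fun x => x)) = some pr.2 then ans ++ [pr.1 + 1] else ans) []

def pvSelB (scores : List Int) : List Int :=
  (PySem.List.enumerate scores).foldl
    (fun ans pr =>
      if pr.2 == ((PySem.List.max? scores (fun x => x)).getD 0) then ans ++ [pr.1 + 1] else ans) []

-- A's res triple (proof-side name; definitionally equal to the port's res, lets inlined).
def pvResA (answers : List Int) : List Int × List Int × List Int :=
  if answers.length > 5 then
    if answers.length % 5 ≠ 0 then
      (List.range (answers.length % 5)).foldl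
        (fun (acc : List Int × List Int × List Int) i =>
          (acc.1 ++ [([1, 2, 3, 4, 5] : List Int).getD i 0],
           acc.2.1 ++ [([2, 1, 2, 3, 2, 4, 2, 5] : List Int).getD i 0],
           acc.2.2 ++ [([3, 3, 1, 1, 2, 2, 4, 4, 5, 5] : List Int).getD i 0]))
        ((List.replicate (answers.length / 5) ([1, 2, 3, 4, 5] : List Int)).flatten,
         (List.replicate (answers.length / 5) ([2, 1, 2, 3, 2, 4, 2, 5] : List Int)).flatten,
         (List.replicate (answers.length / 5) ([3, 3, 1, 1, 2, 2, 4, 4, 5, 5] : List Int)).flatten)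
    else
      ((List.replicate (answers.length / 5) ([1, 2, 3, 4, 5] : List Int)).flatten,
       (List.replicate (answers.length / 5) ([2, 1, 2, 3, 2, 4, 2, 5] : List Int)).flatten,
       (List.replicate (answers.length / 5) ([3, 3, 1, 1, 2, 2, 4, 4, 5, 5] : List Int)).flatten)
  else
    (List.range answers.length).foldl
      (fun (acc : List Int × List Int × List Int) i =>
        (acc.1 ++ [([1, 2, 3, 4, 5] : List Int).getD i 0],
         acc.2.1 ++ [([2, 1, 2, 3, 2, 4, 2, 5] : List Int).getD i 0],
         acc.2.2 ++ [([3, 3, 1, 1, 2, 2, 4, 4, 5, 5] : List Int).getD i 0]))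
      ([], [], [])

theorem solution_eq_tail (answers : List Int) :
    solution answers = pvSelA
      (let cmp : List Int × List Int × List Int :=
        (List.range answers.length).foldl
          (fun (acc : List Int × List Int × List Int) i =>
            ((if (pvResA answers).1.getD i 0 == answers.getD i 0 then
                acc.1 ++ [(pvResA answers).1.getD i 0] else acc.1),
             (if (pvResA answers).2.1.getD i 0 == answers.getD i 0 then
                acc.2.1 ++ [(pvResA answers).2.1.getD i 0] else acc.2.1),
             (if (pvResA answers).2.2.getD i 0 == answers.getD i 0 then
                acc.2.2 ++ [(pvResA answers).2.2.getD i 0] else acc.2.2)))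
          ([], [], [])
       [(cmp.1.length : Int), (cmp.2.1.length : Int), (cmp.2.2.length : Int)]) := rfl

theorem solution_alt_eq_tail (answers : List Int) :
    solution_alt answers = pvSelB
      [pvCntB answers [1, 2, 3, 4, 5], pvCntB answers [2, 1, 2, 3, 2, 4, 2, 5],
       pvCntB answers [3, 3, 1, 1, 2, 2, 4, 4, 5, 5]] := rfl

theorem res_char_small (p : List Int) (hp : 5 ≤ p.length) (n : Nat) (hn : n ≤ 5) (i : Nat)
    (hi : i < n) :
    ((List.range n).map (fun j => p.getD j 0)).getD i 0 = p.getD (i % p.length) 0 := by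
  rw [List.getD_eq_getElem _ _ (by simpa using hi)]
  simp only [List.getElem_map, List.getElem_range]
  rw [Nat.mod_eq_of_lt (by omega), List.getD_eq_getElem _ _ (by omega)]

-- Characterization of the res triple: element i of component k is pattern_k[i % len_k].
theorem pvResA_char (answers : List Int) :
    (∀ i < answers.length,
        (pvResA answers).1.getD i 0 = ([1, 2, 3, 4, 5] : List Int).getD (i % ([1, 2, 3, 4, 5] : List Int).length) 0)
  ∧ (∀ i < answers.length,
        (pvResA answers).2.1.getD i 0 = ([2, 1, 2, 3, 2, 4, 2, 5] : List Int).getD (i % ([2, 1, 2, 3, 2, 4, 2, 5] : List Int).length) 0)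
  ∧ (∀ i < answers.length,
        (pvResA answers).2.2.getD i 0 = ([3, 3, 1, 1, 2, 2, 4, 4, 5, 5] : List Int).getD (i % ([3, 3, 1, 1, 2, 2, 4, 4, 5, 5] : List Int).length) 0) := by
  unfold pvResA
  by_cases h5 : answers.length > 5
  · rw [if_pos h5]
    by_cases hr : answers.length % 5 ≠ 0
    · rw [if_pos hr, foldl_triple_split]
      refine ⟨fun i hi => ?_, fun i hi => ?_, fun i hi => ?_⟩
      · simp only [PySem.List.foldl_append_singleton_eq_map]
        exact res_char [1, 2, 3, 4, 5] (by decide) answers.length h5 i hi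
      · simp only [PySem.List.foldl_append_singleton_eq_map]
        exact res_char [2, 1, 2, 3, 2, 4, 2, 5] (by decide) answers.length h5 i hi
      · simp only [PySem.List.foldl_append_singleton_eq_map]
        exact res_char [3, 3, 1, 1, 2, 2, 4, 4, 5, 5] (by decide) answers.length h5 i hi
    · rw [if_neg hr]
      push_neg at hr
      refine ⟨fun i hi => ?_, fun i hi => ?_, fun i hi => ?_⟩
      · have h := res_char [1, 2, 3, 4, 5] (by decide) answers.length h5 i hi
        rw [hr, List.range_zero, List.map_nil, List.append_nil] at h
        exact h
      · have h := res_char [2, 1, 2, 3, 2, 4, 2, 5] (by decide) answers.length h5 i hi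
        rw [hr, List.range_zero, List.map_nil, List.append_nil] at h
        exact h
      · have h := res_char [3, 3, 1, 1, 2, 2, 4, 4, 5, 5] (by decide) answers.length h5 i hi
        rw [hr, List.range_zero, List.map_nil, List.append_nil] at h
        exact h
  · rw [if_neg h5, foldl_triple_split]
    push_neg at h5
    refine ⟨fun i hi => ?_, fun i hi => ?_, fun i hi => ?_⟩
    · simp only [PySem.List.foldl_append_singleton_eq_map, List.nil_append]
      exact res_char_small [1, 2, 3, 4, 5] (by decide) answers.length h5 i hi
    · simp only [PySem.List.foldl_append_singleton_eq_map, List.nil_append]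
      exact res_char_small [2, 1, 2, 3, 2, 4, 2, 5] (by decide) answers.length h5 i hi
    · simp only [PySem.List.foldl_append_singleton_eq_map, List.nil_append]
      exact res_char_small [3, 3, 1, 1, 2, 2, 4, 4, 5, 5] (by decide) answers.length h5 i hi

-- enumerate-indexed countP equals range-indexed countP (B's pass vs an index loop).
theorem enum_count (q : Int → Int → Bool) (xs : List Int) : ∀ (s : Int),
    List.countP (fun pr : Int × Int => q pr.1 pr.2) (PySem.List.enumerate xs s)
      = List.countP (fun k : Nat => q (s + (k : Int)) (xs.getD k 0)) (List.range xs.length) := by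
  induction xs with
  | nil => intro s; simp [PySem.List.enumerate_nil]
  | cons x xs ih =>
    intro s
    rw [PySem.List.enumerate_cons, List.countP_cons]
    rw [List.length_cons, List.range_succ_eq_map, List.countP_cons, List.countP_map]
    rw [ih (s + 1)]
    have hfun : ((fun k : Nat => q (s + (k : Int)) ((x :: xs).getD k 0)) ∘ Nat.succ)
        = (fun k : Nat => q ((s + 1) + (k : Int)) (xs.getD k 0)) := by
      funext k
      have harg : s + ((Nat.succ k : Nat) : Int) = (s + 1) + (k : Int) := by push_cast; ring
      simp only [Function.comp, harg, List.getD_cons_succ]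
    rw [hfun]
    simp

-- A's per-pattern count (append-if loop length) equals B's per-pattern count.
theorem cnt_eq (answers p res : List Int)
    (hres : ∀ i < answers.length, res.getD i 0 = p.getD (i % p.length) 0) :
    (((List.range answers.length).foldl
        (fun acc i => if res.getD i 0 == answers.getD i 0 then acc ++ [res.getD i 0] else acc)
        ([] : List Int)).length : Int)
      = pvCntB answers p := by
  rw [PySem.List.foldl_append_if (fun i => res.getD i 0 == answers.getD i 0)
      (fun i => res.getD i 0) (List.range answers.length) []]
  unfold pvCntB
  rw [PySem.List.foldl_if_add_one
      (fun pr => p.getD (pr.1.toNat % p.length) 0 == pr.2) (PySem.List.enumerate answers) 0]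
  rw [enum_count (fun i a => p.getD (i.toNat % p.length) 0 == a) answers 0]
  rw [Int.zero_add]
  simp only [List.nil_append, List.length_map, List.countP_eq_length_filter]
  have hfil : List.filter (fun i => res.getD i 0 == answers.getD i 0) (List.range answers.length)
      = List.filter (fun (k : Nat) => p.getD ((0 + (k : Int)).toNat % p.length) 0 == answers.getD k 0)
          (List.range answers.length) := by
    apply List.filter_congr
    intro k hk
    simp only [List.mem_range] at hk
    rw [hres k hk]
    simp
  rw [hfil]

-- The final selection loops of A and B agree on any 3-element score list.
theorem sel_eq (a b c : Int) : pvSelA [a, b, c] = pvSelB [a, b, c] := by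
  unfold pvSelA pvSelB
  rw [PySem.List.max?_id_cons]
  rw [show PySem.List.enumerate ([a, b, c] : List Int) (0 : Int) = [(0, a), (1, b), (2, c)] from rfl]
  simp only [List.foldl_cons, List.foldl_nil, Option.getD_some, Option.some_inj, beq_iff_eq]
  simp only [eq_comm]

-- ===== VERDICT (by name: the statement is the Claim_ definition above) =====
theorem solution_spec : Claim_equal_solution := by
  intro answers _
  unfold Spec_solution
  obtain ⟨hc1, hc2, hc3⟩ := pvResA_char answers
  rw [solution_eq_tail, solution_alt_eq_tail]
  simp only [foldl_triple_split_if]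
  rw [cnt_eq answers _ _ hc1, cnt_eq answers _ _ hc2, cnt_eq answers _ _ hc3]
  exact sel_eq _ _ _
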